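-- pv_equiv track=rewrite | github.com/4b3c/WikiShorts | Restart/Aligner.py | combine_phrases
-- ===== SOURCE A (Python) =====
-- def length_of(list_of_words):
-- 	return sum(len(word) for word in list_of_words) + len(list_of_words)
--
-- def add_word_if_fits(current_words, timestamps, starting_index, phrase_max_length=16):
-- 	if current_words[-1][-1] in ['.', ',', '?', '!', '"']:
-- 		return starting_index, current_words
-- 	if starting_index < len(timestamps) and length_of(current_words) + length_of(timestamps[starting_index][0]) <= phrase_max_length:
-- 		new_current_words = current_words + timestamps[starting_index][0]
-- 		new_starting_index = starting_index + 1
-- 		starting_index, current_words = add_word_if_fits(new_current_words, timestamps, new_starting_index)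
--
-- 	return starting_index, current_words
--
-- def combine_phrases(timestamps, section_end_time):
-- 	combined_phrases = []
-- 	timestamp_index = 0
--
--
-- 	while timestamp_index < len(timestamps):
-- 		current_phrase = timestamps[timestamp_index][0]
-- 		current_phrase_start_time = timestamps[timestamp_index][1]
-- 		timestamp_index += 1
--
-- 		timestamp_index, current_phrase = add_word_if_fits(current_phrase, timestamps, timestamp_index)
--
-- 		if timestamp_index < len(timestamps):
-- 			current_phrase_end_time = timestamps[timestamp_index][1]
-- 		else:
-- 			current_phrase_end_time = section_end_time
-- 		combined_phrases.append((current_phrase, current_phrase_start_time, current_phrase_end_time))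
--
-- 	return combined_phrases
-- ===== SOURCE B (Python) =====
-- def length_of(list_of_words):
-- 	return sum(len(word) for word in list_of_words) + len(list_of_words)
--
-- def combine_phrases(timestamps, section_end_time):
-- 	combined = []
-- 	rest = list(timestamps)
-- 	while rest:
-- 		(phrase, start), rest = rest[0], rest[1:]
-- 		while rest and phrase[-1][-1] not in '.,?!"' and length_of(phrase) + length_of(rest[0][0]) <= 16:
-- 			phrase = phrase + rest[0][0]
-- 			rest = rest[1:]
-- 		combined.append((phrase, start, rest[0][1] if rest else section_end_time))
-- 	return combined
-- ===== Notes on version B (the rewrite author's own statement) =====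
-- stated objective: alternative
-- what changed: The recursive index-based helper add_word_if_fits is gone: B consumes the timestamp list itself from the front (rest = rest[1:]), so there is no integer index, no bounds test against len(timestamps), and the end time is read off the head of the remaining list instead of by indexing.
-- outside the precondition, e.g. on combine_phrases([(['a'], 0), ([], 1)], 5): A returns [(['a'], 0, 5)], B returns [(['a'], 0, 5)]
import Mathlib
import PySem

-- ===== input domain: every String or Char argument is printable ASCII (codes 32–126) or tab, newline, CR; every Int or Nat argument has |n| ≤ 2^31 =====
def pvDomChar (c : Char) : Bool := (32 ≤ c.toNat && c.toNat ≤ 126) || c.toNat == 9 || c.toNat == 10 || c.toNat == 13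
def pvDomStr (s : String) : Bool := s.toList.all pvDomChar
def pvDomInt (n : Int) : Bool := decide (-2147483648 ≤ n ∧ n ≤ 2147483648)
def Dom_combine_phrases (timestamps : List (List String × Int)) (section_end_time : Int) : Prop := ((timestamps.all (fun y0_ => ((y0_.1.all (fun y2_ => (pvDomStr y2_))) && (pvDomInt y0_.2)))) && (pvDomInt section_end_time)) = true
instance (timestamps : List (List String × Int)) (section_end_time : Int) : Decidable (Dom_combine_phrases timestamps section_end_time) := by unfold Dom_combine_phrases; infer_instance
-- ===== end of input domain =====

-- B drops the recursive, index-based helper: it consumes the timestamp list from the front, so no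
-- integer index and no len() bounds test exist ('alternative'); return-value equivalence, no mutation.

-- last char of the last word: current_words[-1][-1]; none = IndexError (outside Pre_)
def pvLastChar (ws : List String) : Option Char :=
  (PySem.List.pyGet? ws (-1)).bind (fun w => PySem.Str.pyGet? w (-1))

def length_of (list_of_words : List String) : Int :=
  (list_of_words.foldl (fun acc word => acc + PySem.Str.len word) 0) + list_of_words.length

-- ===== PORT A =====
-- fuel only makes the recursion total; inside Pre_ the guard starting_index < len bounds the depth
def add_word_if_fits (current_words : List String) (timestamps : List (List String × Int))
    (starting_index : Int) (fuel : Nat) : Int × List String :=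
  match fuel with
  | 0 => (starting_index, current_words)
  | Nat.succ fuel =>
    if (pvLastChar current_words).getD ' ' ∈ ['.', ',', '?', '!', '"'] then
      (starting_index, current_words)
    else if starting_index < (timestamps.length : Int) ∧
        length_of current_words +
          length_of ((PySem.List.pyGet? timestamps starting_index).getD ([], 0)).1 ≤ 16 then
      add_word_if_fits
        (current_words ++ ((PySem.List.pyGet? timestamps starting_index).getD ([], 0)).1)
        timestamps (starting_index + 1) fuel
    else (starting_index, current_words)

def combine_phrases_while (timestamps : List (List String × Int)) (section_end_time : Int)
    (combined_phrases : List (List String × Int × Int)) (timestamp_index : Int) (fuel : Nat) :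
    List (List String × Int × Int) :=
  match fuel with
  | 0 => combined_phrases
  | Nat.succ fuel =>
    if timestamp_index < (timestamps.length : Int) then
      let entry := (PySem.List.pyGet? timestamps timestamp_index).getD ([], 0)
      let r := add_word_if_fits entry.1 timestamps (timestamp_index + 1) (timestamps.length + 1)
      let current_phrase_end_time :=
        if r.1 < (timestamps.length : Int) then
          ((PySem.List.pyGet? timestamps r.1).getD ([], 0)).2
        else section_end_time
      combine_phrases_while timestamps section_end_time
        (combined_phrases ++ [(r.2, entry.2, current_phrase_end_time)]) r.1 fuel
    else combined_phrases

def combine_phrases (timestamps : List (List String × Int)) (section_end_time : Int) :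
    List (List String × Int × Int) :=
  combine_phrases_while timestamps section_end_time [] 0 (timestamps.length + 1)

-- ===== PORT B =====
-- inner while of Source B: rest nonempty (the match), then punctuation, then the length bound
def altExtend (phrase : List String) :
    List (List String × Int) → List String × List (List String × Int)
  | [] => (phrase, [])
  | (w, t) :: rest =>
    if (".,?!\"".toList.contains ((pvLastChar phrase).getD ' ')) = false ∧
        length_of phrase + length_of w ≤ 16 then
      altExtend (phrase ++ w) rest
    else (phrase, (w, t) :: rest)

-- termination measure for the outer loop: the inner loop only shortens the remaining list
theorem altExtend_len_le (phrase : List String) (l : List (List String × Int)) :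
    (altExtend phrase l).2.length ≤ l.length := by
  induction l generalizing phrase with
  | nil => simp [altExtend]
  | cons h t ih =>
    obtain ⟨w, s⟩ := h
    rw [altExtend]
    split_ifs
    · exact le_trans (ih _) (Nat.le_succ _)
    · simp

-- outer while of Source B: emit one phrase from the head of the remaining list, continue on the rest
def altGo (section_end_time : Int) :
    List (List String × Int) → List (List String × Int × Int)
  | [] => []
  | (ws, start) :: rest =>
    let r := altExtend ws rest
    (r.1, start,
      match r.2 with
      | [] => section_end_time
      | (_, t) :: _ => t) :: altGo section_end_time r.2
termination_by l => l.length
decreasing_by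
  simpa using Nat.lt_succ_of_le (altExtend_len_le ws rest)

def combine_phrases_alt (timestamps : List (List String × Int)) (section_end_time : Int) :
    List (List String × Int × Int) :=
  altGo section_end_time timestamps

-- ===== PRECONDITION & SPEC =====
-- Pre_ excludes inputs holding an empty word list or a list whose last word is the empty string:
-- on those current_words[-1][-1] raises IndexError whenever such a list starts (or ends merged into)
-- a phrase; the only returning inputs excluded are those whose empty word lists are all absorbed mid-phrase.
def Pre_combine_phrases (timestamps : List (List String × Int)) (section_end_time : Int) : Prop :=
  ∀ p ∈ timestamps, p.1.getLast?.getD "" ≠ ""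
instance (timestamps : List (List String × Int)) (section_end_time : Int) :
    Decidable (Pre_combine_phrases timestamps section_end_time) := by
  unfold Pre_combine_phrases; infer_instance

def pvWitness_combine_phrases : (List (List String × Int)) × Int :=
  ([(["Hello"], 0), (["world!"], 5)], 10)

def Spec_combine_phrases (timestamps : List (List String × Int)) (section_end_time : Int) (out : List (List String × Int × Int)) : Prop := out = combine_phrases_alt timestamps section_end_time
instance (timestamps : List (List String × Int)) (section_end_time : Int) (out : List (List String × Int × Int)) : Decidable (Spec_combine_phrases timestamps section_end_time out) := by unfold Spec_combine_phrases; infer_instance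

-- ===== CLAIM =====
def Claim_equal_combine_phrases : Prop := ∀ (timestamps : List (List String × Int)) (section_end_time : Int), Dom_combine_phrases timestamps section_end_time → Pre_combine_phrases timestamps section_end_time → Spec_combine_phrases timestamps section_end_time (combine_phrases timestamps section_end_time)

-- ===== LEMMAS AND PROOFS =====

-- the two punctuation tests name the same five characters
theorem pv_punct_iff (c : Char) :
    ((".,?!\"".toList.contains c) = false) ↔ ¬ (c ∈ ['.', ',', '?', '!', '"']) := by
  have h : ".,?!\"".toList = ['.', ',', '?', '!', '"'] := by rfl
  rw [h]
  simp

-- altExtend only removes elements from the front of its input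
theorem altExtend_suffix (phrase : List String) (l : List (List String × Int)) :
    (altExtend phrase l).2 <:+ l := by
  induction l generalizing phrase with
  | nil => simp [altExtend]
  | cons h t ih =>
    obtain ⟨w, s⟩ := h
    rw [altExtend]
    split_ifs
    · exact (ih _).trans (List.suffix_cons _ _)
    · simp

theorem suffix_drop_eq {α : Type} {l ts : List α} (h : l <:+ ts) :
    ts.drop (ts.length - l.length) = l := by
  obtain ⟨pre, rfl⟩ := h
  simp

-- A's recursive helper computes B's front-consumption loop, index ↔ dropped prefix length
theorem pv_extend_eq (ts : List (List String × Int)) :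
    ∀ (fuel : Nat) (i : Nat) (phrase : List String), i ≤ ts.length → ts.length - i < fuel →
      add_word_if_fits phrase ts (i : Int) fuel =
        ((ts.length : Int) - ((altExtend phrase (ts.drop i)).2.length : Int),
         (altExtend phrase (ts.drop i)).1) := by
  intro fuel
  induction fuel with
  | zero => omega
  | succ n ih =>
    intro i phrase hi hf
    rw [add_word_if_fits]
    by_cases hend : i = ts.length
    · subst hend
      simp only [List.drop_length, altExtend]
      split_ifs with hp hc
      · simp
      · exfalso; exact absurd hc.1 (by omega)
      · simp
    · have hilt : i < ts.length := by omega
      have hdrop : ts.drop i = ts[i] :: ts.drop (i + 1) := List.drop_eq_getElem_cons hilt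
      have hget : PySem.List.pyGet? ts (i : Int) = some ts[i] := by
        simp [PySem.List.pyGet?_natCast, List.getElem?_eq_getElem hilt]
      rcases hvw : ts[i] with ⟨w, s⟩
      rw [hdrop, hvw, altExtend]
      by_cases hp : (pvLastChar phrase).getD ' ' ∈ ['.', ',', '?', '!', '"']
      · have hct : (".,?!\"".toList.contains ((pvLastChar phrase).getD ' ')) = true := by
          rcases Bool.eq_false_or_eq_true (".,?!\"".toList.contains ((pvLastChar phrase).getD ' ')) with h2 | h2
          · exact h2
          · exact absurd hp ((pv_punct_iff _).mp h2)
        simp only [if_pos hp, hct]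
        simp
        omega
      · have hnp : (".,?!\"".toList.contains ((pvLastChar phrase).getD ' ')) = false :=
          (pv_punct_iff _).mpr hp
        simp only [if_neg hp, hget, Option.getD_some, hvw]
        by_cases hlen : length_of phrase + length_of w ≤ 16
        · have hc : (i : Int) < (ts.length : Int) ∧ length_of phrase + length_of w ≤ 16 :=
            ⟨by exact_mod_cast hilt, hlen⟩
          rw [if_pos hc, if_pos ⟨hnp, hlen⟩]
          have : ((i : Int) + 1) = ((i + 1 : Nat) : Int) := by push_cast; ring
          rw [this, ih (i + 1) (phrase ++ w) (by omega) (by omega)]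
        · rw [if_neg (by tauto), if_neg (by tauto)]
          simp
          omega

theorem pv_outer_eq (ts : List (List String × Int)) (se : Int) :
    ∀ (fuel : Nat) (i : Nat) (acc : List (List String × Int × Int)), i ≤ ts.length → ts.length - i < fuel →
      combine_phrases_while ts se acc (i : Int) fuel = acc ++ altGo se (ts.drop i) := by
  intro fuel
  induction fuel with
  | zero => omega
  | succ n ih =>
    intro i acc hi hf
    rw [combine_phrases_while]
    by_cases hend : i = ts.length
    · subst hend
      rw [if_neg (by omega), List.drop_length, altGo]
      simp
    · have hilt : i < ts.length := by omega
      have hdrop : ts.drop i = ts[i] :: ts.drop (i + 1) := List.drop_eq_getElem_cons hilt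
      have hget : PySem.List.pyGet? ts (i : Int) = some ts[i] := by
        simp [PySem.List.pyGet?_natCast, List.getElem?_eq_getElem hilt]
      rcases hvw : ts[i] with ⟨ws, start⟩
      rw [if_pos (by exact_mod_cast hilt), hdrop, hvw, altGo]
      simp only [hget, hvw, Option.getD_some]
      have hLle : (altExtend ws (ts.drop (i + 1))).2.length ≤ ts.length - i - 1 := by
        have h1 := altExtend_len_le ws (ts.drop (i + 1))
        have h2 : (ts.drop (i + 1)).length = ts.length - (i + 1) := List.length_drop ..
        omega
      have hsuf : (altExtend ws (ts.drop (i + 1))).2 <:+ ts :=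
        (altExtend_suffix ws (ts.drop (i + 1))).trans (List.drop_suffix _ _)
      have hdropeq : ts.drop (ts.length - (altExtend ws (ts.drop (i + 1))).2.length) =
          (altExtend ws (ts.drop (i + 1))).2 := suffix_drop_eq hsuf
      have hext := pv_extend_eq ts (ts.length + 1) (i + 1) ws (by omega) (by omega)
      have hcast : ((i : Int) + 1) = ((i + 1 : Nat) : Int) := by push_cast; ring
      rw [hcast, hext]
      set rB := altExtend ws (ts.drop (i + 1)) with hrB
      set L := rB.2.length with hL
      have hLn : L ≤ ts.length := by omega
      have hidx : ((ts.length : Int) - (L : Int)) = ((ts.length - L : Nat) : Int) := by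
        push_cast [Nat.cast_sub hLn]; ring
      rcases hr2 : rB.2 with _ | ⟨⟨w2, t2⟩, rest2⟩
      · have hL0 : L = 0 := by rw [hL, hr2]; rfl
        rw [if_neg (by omega)]
        rw [hidx, ih (ts.length - L) _ (by omega) (by omega)]
        simp [altGo, hL0]
      · have hLpos : 0 < L := by rw [hL, hr2]; simp
        have hgetL : PySem.List.pyGet? ts ((ts.length : Int) - (L : Int)) = some (w2, t2) := by
          rw [hidx]
          have h0 : ts[ts.length - L]? = some (w2, t2) := by
            have h3 : (ts.drop (ts.length - L))[0]? = ts[ts.length - L + 0]? := List.getElem?_drop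
            rw [hdropeq, hr2] at h3
            simpa using h3.symm
          simp [PySem.List.pyGet?_natCast, h0]
        rw [if_pos (by omega), hgetL]
        rw [hidx, ih (ts.length - L) _ (by omega) (by omega)]
        rw [hdropeq, hr2]
        simp

-- ===== VERDICT =====
theorem combine_phrases_spec : Claim_equal_combine_phrases := by
  intro timestamps section_end_time _ _
  unfold Spec_combine_phrases combine_phrases combine_phrases_alt
  have h := pv_outer_eq timestamps section_end_time (timestamps.length + 1) 0 [] (by omega) (by omega)
  simpa using h
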